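-- pv_equiv track=rewrite | github.com/Mike77154/PYfight-engine-mugen-like- | palette_mgr.py | _find_largest_color_block
-- ===== SOURCE A (Python) =====
-- def _find_largest_color_block(rgb256):
--     """Devuelve (start,length) del mayor bloque no-negro."""
--     def is_black(rgb): return rgb == (0,0,0)
--     best_s, best_len = 0, 0
--     s, n = None, 0
--     for i, rgb in enumerate(rgb256):
--         if not is_black(rgb):
--             if s is None: s, n = i, 1
--             else: n += 1
--         else:
--             if s is not None and n > best_len:
--                 best_s, best_len = s, n
--             s, n = None, 0
--     if s is not None and n > best_len:
--         best_s, best_len = s, n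
--     if best_len == 0:
--         return 0, 0
--     return best_s, best_len
-- ===== SOURCE B (Python) =====
-- def _find_largest_color_block(rgb256):
--     """Devuelve (start,length) del mayor bloque no-negro."""
--     ends, run = [], 0
--     for rgb in rgb256:
--         run = 0 if rgb == (0, 0, 0) else run + 1
--         ends.append(run)
--     if not ends or max(ends) == 0:
--         return 0, 0
--     m = max(ends)
--     e = ends.index(m)
--     return e - m + 1, m
-- ===== Notes on version B (the rewrite author's own statement) =====
-- stated objective: alternative
-- what changed: Replaces A's online sentinel state machine (Optional start + running count, best updated at run breaks plus an end-of-loop flush) by two staged passes: first materialize the DP table of run lengths ending at each index, then derive the answer arithmetically from max(ends) and ends.index(max) with no best-tracking during the scan.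
import Mathlib
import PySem

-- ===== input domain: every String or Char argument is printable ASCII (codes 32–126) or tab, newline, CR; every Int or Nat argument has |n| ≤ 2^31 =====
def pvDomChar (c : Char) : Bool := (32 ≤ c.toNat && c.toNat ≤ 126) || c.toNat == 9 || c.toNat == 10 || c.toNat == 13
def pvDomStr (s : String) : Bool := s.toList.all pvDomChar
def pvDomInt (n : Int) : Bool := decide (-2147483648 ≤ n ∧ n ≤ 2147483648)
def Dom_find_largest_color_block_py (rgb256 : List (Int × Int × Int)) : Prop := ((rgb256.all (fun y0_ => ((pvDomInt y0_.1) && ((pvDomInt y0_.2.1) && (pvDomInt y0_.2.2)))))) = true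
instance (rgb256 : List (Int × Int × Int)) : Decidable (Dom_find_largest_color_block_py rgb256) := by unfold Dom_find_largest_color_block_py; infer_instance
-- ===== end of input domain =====

-- B replaces A's online sentinel state machine by two staged passes: a DP table of
-- run lengths ending at each index, then max/index arithmetic (objective: alternative).

-- ===== PORT A =====
-- nested helper `is_black`
def pvIsBlack (rgb : Int × Int × Int) : Bool := rgb == ((0 : Int), (0 : Int), (0 : Int))

-- the `for i, rgb in enumerate(rgb256)` loop; state = (best_s, best_len), s, n
def pvLoopA : List (Int × Int × Int) → Int → (Int × Int) → Option Int → Int →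
    ((Int × Int) × Option Int × Int)
  | [], _, b, s, n => (b, s, n)
  | rgb :: rest, i, b, s, n =>
    if !(pvIsBlack rgb) then
      match s with
      | none => pvLoopA rest (i + 1) b (some i) 1
      | some s0 => pvLoopA rest (i + 1) b (some s0) (n + 1)
    else
      match s with
      | some s0 =>
        if n > b.2 then pvLoopA rest (i + 1) (s0, n) none 0
        else pvLoopA rest (i + 1) b none 0
      | none => pvLoopA rest (i + 1) b none 0

-- the code after the loop: final flush of an open run, then the best_len == 0 check
def pvFinalizeA : ((Int × Int) × Option Int × Int) → Int × Int
  | (b, s, n) =>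
    let b2 := match s with
      | some s0 => if n > b.2 then (s0, n) else b
      | none => b
    if b2.2 = 0 then (0, 0) else b2

def find_largest_color_block_py (rgb256 : List (Int × Int × Int)) : Int × Int :=
  pvFinalizeA (pvLoopA rgb256 0 (0, 0) none 0)

-- ===== PORT B =====
-- pass 1: `for rgb in rgb256: run = 0 if black else run+1; ends.append(run)`
-- pass 2: max(ends) and ends.index(m) via PySem (the `.getD 0` only totalizes the
-- Option: the `not ends` short-circuit / m ∈ ends make both lookups succeed)
def find_largest_color_block_py_alt (rgb256 : List (Int × Int × Int)) : Int × Int :=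
  let p := rgb256.foldl (fun (st : List Int × Int) rgb =>
      let run := if rgb == ((0 : Int), (0 : Int), (0 : Int)) then 0 else st.2 + 1
      (st.1 ++ [run], run)) ([], 0)
  let ends := p.1
  if ends = [] ∨ (PySem.List.max? ends (fun v => v)).getD 0 = 0 then (0, 0)
  else
    let m := (PySem.List.max? ends (fun v => v)).getD 0
    let e : Int := ((PySem.List.index? ends m).getD 0 : Nat)
    (e - m + 1, m)

-- ===== PRECONDITION & SPEC =====
def Spec_find_largest_color_block_py (rgb256 : List (Int × Int × Int)) (out : Int × Int) : Prop := out = find_largest_color_block_py_alt rgb256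
instance (rgb256 : List (Int × Int × Int)) (out : Int × Int) : Decidable (Spec_find_largest_color_block_py rgb256 out) := by unfold Spec_find_largest_color_block_py; infer_instance

-- ===== CLAIM (what is proved, stated in full; the proofs are below) =====
def Claim_equal_find_largest_color_block_py : Prop := ∀ (rgb256 : List (Int × Int × Int)), Dom_find_largest_color_block_py rgb256 → Spec_find_largest_color_block_py rgb256 (find_largest_color_block_py rgb256)

-- ===== LEMMAS AND PROOFS =====

-- proof-side reference objects ------------------------------------------------

-- the table of run lengths ending at each index, seeded with `run`
def pvEnds : List (Int × Int × Int) → Int → List Int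
  | [], _ => []
  | x :: rest, run =>
    let run' := if x == ((0 : Int), (0 : Int), (0 : Int)) then 0 else run + 1
    run' :: pvEnds rest run'

def pvMaxE (E : List Int) : Int := E.foldl max 0

def pvIdxE (E : List Int) (v : Int) : Int := (((PySem.List.index? E v).getD 0 : Nat) : Int)

-- what both programs compute, as a function of the ends table
def pvCombine (i bs bl : Int) (E : List Int) : Int × Int :=
  if pvMaxE E > bl then (i + pvIdxE E (pvMaxE E) - pvMaxE E + 1, pvMaxE E) else (bs, bl)

def pvOneTo (k : Nat) : List Int := (List.range k).map (fun j : Nat => ((j : Int) + 1))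

-- basic facts -----------------------------------------------------------------

theorem pvGetLastD_cons (r d : Int) (L : List Int) :
    (r :: L).getLast?.getD d = L.getLast?.getD r := by
  rw [← List.getLastD_eq_getLast?, ← List.getLastD_eq_getLast?, List.getLastD_cons]

theorem pvEnds_foldl (rgb256 : List (Int × Int × Int)) :
    ∀ (acc : List Int) (run : Int),
      rgb256.foldl (fun (st : List Int × Int) rgb =>
        let r := if rgb == ((0 : Int), (0 : Int), (0 : Int)) then 0 else st.2 + 1
        (st.1 ++ [r], r)) (acc, run)
      = (acc ++ pvEnds rgb256 run, (pvEnds rgb256 run).getLastD run) := by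
  induction rgb256 with
  | nil => intro acc run; simp [pvEnds]
  | cons x rest ih =>
    intro acc run
    simp only [List.foldl_cons, pvEnds]
    rw [ih]
    simp [pvGetLastD_cons]

theorem pvEnds_nonneg : ∀ (xs : List (Int × Int × Int)) (s : Int), 0 ≤ s →
    ∀ v ∈ pvEnds xs s, 0 ≤ v := by
  intro xs
  induction xs with
  | nil => intro s _ v hv; simp [pvEnds] at hv
  | cons x rest ih =>
    intro s hs v hv
    by_cases hx : (x == ((0 : Int), (0 : Int), (0 : Int))) = true
    · simp only [pvEnds, hx, if_true, List.mem_cons] at hv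
      rcases hv with h | h
      · omega
      · exact ih 0 le_rfl v h
    · simp only [pvEnds, hx, Bool.false_eq_true, if_false, List.mem_cons] at hv
      rcases hv with h | h
      · omega
      · exact ih (s + 1) (by omega) v h

-- A's loop over a block of non-black elements from an open run just extends the count
theorem pvLoopA_open (run : List (Int × Int × Int))
    (h : ∀ y ∈ run, pvIsBlack y = false) :
    ∀ (tail : List (Int × Int × Int)) (j : Int) (b : Int × Int) (s0 n : Int),
      pvLoopA (run ++ tail) j b (some s0) n =
        pvLoopA tail (j + run.length) b (some s0) (n + run.length) := by
  induction run with
  | nil => intro tail j b s0 n; simp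
  | cons y run' ih =>
    intro tail j b s0 n
    have hy : pvIsBlack y = false := h y (by simp)
    have := ih (fun z hz => h z (by simp [hz])) tail (j + 1) b s0 (n + 1)
    simp only [List.cons_append, pvLoopA, hy, Bool.not_false, if_true]
    rw [this]
    congr 1 <;> (push_cast [List.length_cons]; ring)

-- max-fold facts
theorem pvFoldlMax_shift (E : List Int) :
    ∀ a b : Int, E.foldl max (max a b) = max a (E.foldl max b) := by
  induction E with
  | nil => intro a b; rfl
  | cons x t ih =>
    intro a b
    rw [List.foldl_cons, List.foldl_cons, max_assoc, ih]

theorem pvMaxE_nonneg (E : List Int) : 0 ≤ pvMaxE E :=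
  (PySem.List.le_foldl_max E 0).1

theorem pvMaxE_mem (E : List Int) (h : pvMaxE E ≠ 0) : pvMaxE E ∈ E := by
  rcases PySem.List.foldl_max_mem E 0 with h0 | h0
  · exact absurd h0 h
  · exact h0

theorem pvMaxE_zero_cons (E : List Int) : pvMaxE (0 :: E) = pvMaxE E := by
  simp [pvMaxE]

theorem pvOneTo_succ (n : Nat) : pvOneTo (n + 1) = pvOneTo n ++ [((n : Int) + 1)] := by
  simp [pvOneTo, List.range_succ]

theorem pvOneTo_foldl (k : Nat) : ∀ a : Int,
    (pvOneTo k).foldl max a = if k = 0 then a else max a k := by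
  induction k with
  | zero => intro a; simp [pvOneTo]
  | succ n ih =>
    intro a
    rw [pvOneTo_succ, List.foldl_append, ih a, List.foldl_cons, List.foldl_nil]
    by_cases hn : n = 0
    · subst hn
      simp
    · rw [if_neg hn, if_neg (Nat.succ_ne_zero n)]
      push_cast
      omega

theorem mem_pvOneTo (k : Nat) (v : Int) : v ∈ pvOneTo k ↔ 1 ≤ v ∧ v ≤ (k : Int) := by
  constructor
  · intro h
    simp only [pvOneTo, List.mem_map, List.mem_range] at h
    obtain ⟨j, hj, hv⟩ := h
    omega
  · rintro ⟨h1, h2⟩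
    simp only [pvOneTo, List.mem_map, List.mem_range]
    refine ⟨(v - 1).toNat, by omega, by omega⟩

-- first-occurrence index facts (Python's list.index)
theorem pvIdx_append_not_mem (v : Int) :
    ∀ (l t : List Int), v ∉ l →
      PySem.List.index? (l ++ t) v = (PySem.List.index? t v).map (· + l.length) := by
  intro l
  induction l with
  | nil => intro t _; simp [Option.map_id']
  | cons x l' ih =>
    intro t hv
    have hx : x ≠ v := fun h => hv (by simp [h])
    rw [List.cons_append, PySem.List.index?_cons_of_ne _ hx, ih t (fun h => hv (by simp [h]))]
    cases PySem.List.index? t v with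
    | none => simp
    | some j => simp; omega

theorem pvIdx_oneTo_self (k : Nat) (hk : 1 ≤ k) :
    PySem.List.index? (pvOneTo k) (k : Int) = some (k - 1) := by
  obtain ⟨n, rfl⟩ : ∃ n, k = n + 1 := ⟨k - 1, by omega⟩
  rw [pvOneTo_succ]
  have hnot : ((n : Int) + 1) ∉ pvOneTo n := by
    rw [mem_pvOneTo]; omega
  have h := PySem.List.index?_append_singleton_self (pvOneTo n) ((n : Int) + 1) hnot
  rw [show (((n : Nat) + 1 : Nat) : Int) = (n : Int) + 1 by push_cast; ring, h]
  simp [pvOneTo]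

-- pvCombine step lemmas
theorem pvCombine_zero_cons (i bs bl : Int) (E : List Int) (hbl : 0 ≤ bl) :
    pvCombine i bs bl (0 :: E) = pvCombine (i + 1) bs bl E := by
  unfold pvCombine
  rw [pvMaxE_zero_cons]
  by_cases hM : pvMaxE E > bl
  · have hM0 : pvMaxE E ≠ 0 := by omega
    obtain ⟨j, hj⟩ : ∃ j, PySem.List.index? E (pvMaxE E) = some j :=
      Option.isSome_iff_exists.mp
        ((PySem.List.index?_isSome_iff E (pvMaxE E)).2 (pvMaxE_mem E hM0))
    have hne : (0 : Int) ≠ pvMaxE E := fun h => hM0 h.symm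
    rw [if_pos hM, if_pos hM]
    unfold pvIdxE
    rw [PySem.List.index?_cons_of_ne _ hne, hj]
    simp only [Option.map_some, Option.getD_some, Prod.mk.injEq]
    exact ⟨by push_cast; ring, by trivial⟩
  · rw [if_neg hM, if_neg hM]

theorem pvMaxE_oneTo_append (k : Nat) (hk : 1 ≤ k) (E : List Int) :
    pvMaxE (pvOneTo k ++ 0 :: E) = max (k : Int) (pvMaxE E) := by
  unfold pvMaxE
  rw [List.foldl_append, List.foldl_cons]
  rw [pvOneTo_foldl k 0, if_neg (by omega)]
  rw [show max (max (0 : Int) (k : Int)) (0 : Int) = max (k : Int) 0 from by omega]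
  rw [pvFoldlMax_shift]

theorem pvCombine_oneTo_nil (i bs bl : Int) (k : Nat) (hk : 1 ≤ k) (_hbl : 0 ≤ bl) :
    pvCombine i bs bl (pvOneTo k) =
      if (k : Int) > bl then (i, (k : Int)) else (bs, bl) := by
  unfold pvCombine
  have hM : pvMaxE (pvOneTo k) = (k : Int) := by
    unfold pvMaxE
    rw [pvOneTo_foldl k 0, if_neg (by omega)]
    omega
  rw [hM]
  by_cases hc : (k : Int) > bl
  · rw [if_pos hc, if_pos hc]
    unfold pvIdxE
    rw [pvIdx_oneTo_self k hk]
    simp only [Option.getD_some, Prod.mk.injEq]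
    exact ⟨by push_cast [Nat.cast_sub hk]; ring, by trivial⟩
  · rw [if_neg hc, if_neg hc]

theorem pvCombine_compose (i bs bl : Int) (k : Nat) (hk : 1 ≤ k) (E : List Int)
    (_hbl : 0 ≤ bl) :
    pvCombine i bs bl (pvOneTo k ++ 0 :: E) =
      pvCombine (i + k + 1) (if (k : Int) > bl then i else bs)
        (if (k : Int) > bl then (k : Int) else bl) E := by
  unfold pvCombine
  rw [pvMaxE_oneTo_append k hk E]
  set M := pvMaxE E with hMdef
  have hMnn : 0 ≤ M := pvMaxE_nonneg E
  have hidx_big : M > (k : Int) → ∃ j : Nat, PySem.List.index? E M = some j ∧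
      pvIdxE (pvOneTo k ++ 0 :: E) M = (k : Int) + 1 + (j : Int) := by
    intro hMk
    obtain ⟨j, hj⟩ : ∃ j, PySem.List.index? E M = some j :=
      Option.isSome_iff_exists.mp
        ((PySem.List.index?_isSome_iff E M).2 (pvMaxE_mem E (by omega)))
    refine ⟨j, hj, ?_⟩
    have hnotin : M ∉ (pvOneTo k ++ [(0 : Int)]) := by
      simp only [List.mem_append, List.mem_singleton, mem_pvOneTo]
      omega
    unfold pvIdxE
    rw [show pvOneTo k ++ 0 :: E = (pvOneTo k ++ [(0 : Int)]) ++ E from by simp]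
    rw [pvIdx_append_not_mem M _ E hnotin, hj]
    simp only [Option.map_some, Option.getD_some, List.length_append,
      List.length_singleton, pvOneTo, List.length_map, List.length_range]
    push_cast; ring
  by_cases hc : (k : Int) > bl
  · simp only [if_pos hc]
    by_cases hMk : M > (k : Int)
    · obtain ⟨j, hj, hidx⟩ := hidx_big hMk
      rw [if_pos (show max (k : Int) M > bl from by omega), if_pos hMk,
        show max (k : Int) M = M from by omega, hidx]
      unfold pvIdxE
      rw [hj]
      simp only [Option.getD_some, Prod.mk.injEq]
      exact ⟨by ring, by trivial⟩
    · rw [if_pos (show max (k : Int) M > bl from by omega), if_neg hMk,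
        show max (k : Int) M = (k : Int) from by omega]
      have hmem : (k : Int) ∈ pvOneTo k := by rw [mem_pvOneTo]; omega
      unfold pvIdxE
      rw [PySem.List.index?_append_of_mem _ hmem, pvIdx_oneTo_self k hk]
      simp only [Option.getD_some, Prod.mk.injEq]
      exact ⟨by push_cast [Nat.cast_sub hk]; ring, by trivial⟩
  · simp only [if_neg hc]
    by_cases hMb : M > bl
    · have hMk : M > (k : Int) := by omega
      obtain ⟨j, hj, hidx⟩ := hidx_big hMk
      rw [if_pos (show max (k : Int) M > bl from by omega), if_pos hMb,
        show max (k : Int) M = M from by omega, hidx]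
      unfold pvIdxE
      rw [hj]
      simp only [Option.getD_some, Prod.mk.injEq]
      exact ⟨by ring, by trivial⟩
    · rw [if_neg (show ¬ max (k : Int) M > bl from by omega), if_neg hMb]

-- pvEnds structure lemmas
theorem pvEnds_run (run : List (Int × Int × Int)) :
    (∀ y ∈ run, pvIsBlack y = false) → ∀ (s : Int) (drop : List (Int × Int × Int)),
      pvEnds (run ++ drop) s =
        (List.range run.length).map (fun j : Nat => s + 1 + (j : Int)) ++
          pvEnds drop (s + run.length) := by
  induction run with
  | nil => intro _ s drop; simp
  | cons y run' ih =>
    intro h s drop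
    have hy : (y == ((0 : Int), (0 : Int), (0 : Int))) = false := h y (by simp)
    simp only [List.cons_append, pvEnds, hy]
    rw [if_neg (by simp)]
    rw [ih (fun z hz => h z (by simp [hz])) (s + 1) drop]
    simp only [List.length_cons]
    rw [List.range_succ_eq_map]
    simp only [List.map_cons, List.map_map]
    refine congrArg₂ List.cons (by push_cast; ring) ?_
    refine congrArg₂ (· ++ ·) ?_ ?_
    · apply List.map_congr_left
      intro j _
      simp only [Function.comp_apply]
      push_cast; ring
    · congr 1
      push_cast; ring

theorem pvEnds_reset (drop : List (Int × Int × Int))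
    (h : drop = [] ∨ ∃ y ys, drop = y :: ys ∧ pvIsBlack y = true) (c : Int) :
    pvEnds drop c = pvEnds drop 0 := by
  rcases h with rfl | ⟨y, ys, rfl, hy⟩
  · rfl
  · have hy' : (y == ((0 : Int), (0 : Int), (0 : Int))) = true := hy
    simp [pvEnds, hy']

-- main induction: A's finished loop equals pvCombine of the ends table
theorem pvMainInd (N : Nat) :
    ∀ (xs : List (Int × Int × Int)), xs.length ≤ N →
    ∀ (i bs bl : Int), 0 ≤ bl → (bl = 0 → bs = 0) →
      pvFinalizeA (pvLoopA xs i (bs, bl) none 0) = pvCombine i bs bl (pvEnds xs 0) := by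
  induction N with
  | zero =>
    intro xs hxs i bs bl hbl hb
    have : xs = [] := List.eq_nil_of_length_eq_zero (Nat.le_zero.mp hxs)
    subst this
    simp only [pvLoopA, pvFinalizeA, pvEnds, pvCombine, pvMaxE, List.foldl_nil]
    rw [if_neg (by omega : ¬ (0 : Int) > bl)]
    by_cases h0 : bl = 0
    · simp [h0, hb h0]
    · simp [h0]
  | succ N ih =>
    intro xs hxs i bs bl hbl hb
    cases xs with
    | nil =>
      simp only [pvLoopA, pvFinalizeA, pvEnds, pvCombine, pvMaxE, List.foldl_nil]
      rw [if_neg (by omega : ¬ (0 : Int) > bl)]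
      by_cases h0 : bl = 0
      · simp [h0, hb h0]
      · simp [h0]
    | cons x rest =>
      have hlen : rest.length ≤ N := by
        simpa using Nat.lt_succ_iff.mp (Nat.lt_of_lt_of_le (by simp) hxs)
      by_cases hx : pvIsBlack x = true
      · -- black head: index advances, table gets a 0
        have hx' : (x == ((0 : Int), (0 : Int), (0 : Int))) = true := hx
        have hA : pvLoopA (x :: rest) i (bs, bl) none 0 = pvLoopA rest (i + 1) (bs, bl) none 0 := by
          simp [pvLoopA, hx]
        have hE : pvEnds (x :: rest) 0 = 0 :: pvEnds rest 0 := by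
          simp [pvEnds, hx']
        rw [hA, hE, pvCombine_zero_cons i bs bl _ hbl, ih rest hlen (i + 1) bs bl hbl hb]
      · -- non-black head: peel the whole maximal run
        have hx0 : pvIsBlack x = false := by simpa using hx
        set run := rest.takeWhile (fun y => !(pvIsBlack y)) with hrundef
        set drop := rest.dropWhile (fun y => !(pvIsBlack y)) with hdropdef
        have hsplit : run ++ drop = rest := List.takeWhile_append_dropWhile
        have hrun : ∀ y ∈ run, pvIsBlack y = false := by
          intro y hy
          have := List.mem_takeWhile_imp hy
          simpa using this
        have hxr : ∀ y ∈ (x :: run), pvIsBlack y = false := by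
          intro y hy
          rcases List.mem_cons.mp hy with rfl | hy'
          · exact hx0
          · exact hrun y hy'
        set k : Nat := run.length + 1 with hkdef
        have hk1 : 1 ≤ k := by omega
        have hdropshape : drop = [] ∨ ∃ y ys, drop = y :: ys ∧ pvIsBlack y = true := by
          cases hd : drop with
          | nil => exact Or.inl rfl
          | cons y ys =>
            right
            refine ⟨y, ys, rfl, ?_⟩
            have hne : rest.dropWhile (fun y => !(pvIsBlack y)) ≠ [] := by
              rw [← hdropdef, hd]; simp
            have h2 := List.head_dropWhile_not (fun y => !(pvIsBlack y)) (l := rest) hne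
            have hcons : rest.dropWhile (fun y => !(pvIsBlack y)) = y :: ys := by
              rw [← hdropdef]; exact hd
            simp [hcons] at h2
            simpa using h2
        -- the ends table of x :: rest
        have hE : pvEnds (x :: rest) 0 = pvOneTo k ++ pvEnds drop 0 := by
          rw [← hsplit, show x :: (run ++ drop) = (x :: run) ++ drop from rfl]
          rw [pvEnds_run (x :: run) hxr 0 drop]
          rw [pvEnds_reset drop hdropshape]
          congr 1
          apply List.map_congr_left
          intro j _
          ring
        -- A consumes the run
        have hA1 : pvLoopA (x :: rest) i (bs, bl) none 0 =
            pvLoopA drop (i + k) (bs, bl) (some i) (k : Int) := by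
          rw [← hsplit]
          show pvLoopA (x :: (run ++ drop)) i (bs, bl) none 0 = _
          simp only [pvLoopA, hx0, Bool.not_false, if_true]
          rw [pvLoopA_open run hrun drop (i + 1) (bs, bl) i 1]
          congr 1 <;> (push_cast [hkdef]; ring)
        rcases hdropshape with hd | ⟨y, ys, hd, hy⟩
        · -- the run reaches the end of the list
          rw [hE, hd]
          simp only [pvEnds, List.append_nil]
          rw [hA1, hd]
          show pvFinalizeA ((bs, bl), some i, (k : Int)) = _
          rw [pvCombine_oneTo_nil i bs bl k hk1 hbl]
          unfold pvFinalizeA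
          by_cases hc : (k : Int) > bl
          · simp only [if_pos hc]
            rw [if_neg (by omega : ¬ ((k : Nat) : Int) = 0)]
          · simp only [if_neg hc]
            rw [if_neg (by omega : ¬ bl = 0)]
        · -- a black element closes the run
          have hyslen : ys.length ≤ N := by
            have h1 : drop.length ≤ rest.length := by
              rw [hdropdef]; exact List.length_dropWhile_le _ _
            rw [hd] at h1
            simp only [List.length_cons] at h1
            omega
          have hA2 : pvLoopA drop (i + k) (bs, bl) (some i) (k : Int) =
              pvLoopA ys (i + k + 1)
                (if (k : Int) > bl then (i, (k : Int)) else (bs, bl)) none 0 := by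
            rw [hd]
            by_cases hc : (k : Int) > bl <;> simp [pvLoopA, hy, hc]
          have hb' : (if (k : Int) > bl then (i, (k : Int)) else (bs, bl)).2 = 0 →
              (if (k : Int) > bl then (i, (k : Int)) else (bs, bl)).1 = 0 := by
            split
            · intro h0
              push_cast [hkdef] at h0
              omega
            · exact hb
          have hbl' : 0 ≤ (if (k : Int) > bl then (i, (k : Int)) else (bs, bl)).2 := by
            split
            · simp
            · exact hbl
          rw [hA1, hA2]
          have hEy : pvEnds drop 0 = 0 :: pvEnds ys 0 := by
            rw [hd]
            have hy' : (y == ((0 : Int), (0 : Int), (0 : Int))) = true := hy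
            simp [pvEnds, hy']
          rw [hE, hEy, pvCombine_compose i bs bl k hk1 (pvEnds ys 0) hbl]
          have := ih ys hyslen (i + k + 1)
            (if (k : Int) > bl then (i, (k : Int)) else (bs, bl)).1
            (if (k : Int) > bl then (i, (k : Int)) else (bs, bl)).2 hbl' hb'
          rw [show ((if (k : Int) > bl then (i, (k : Int)) else (bs, bl)).1,
                (if (k : Int) > bl then (i, (k : Int)) else (bs, bl)).2) =
              (if (k : Int) > bl then (i, (k : Int)) else (bs, bl)) from rfl] at this
          rw [this]
          by_cases hc : (k : Int) > bl <;> simp [hc]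

-- B computes pvCombine of the same table
theorem pvAltChar (rgb256 : List (Int × Int × Int)) :
    find_largest_color_block_py_alt rgb256 = pvCombine 0 0 0 (pvEnds rgb256 0) := by
  unfold find_largest_color_block_py_alt
  rw [pvEnds_foldl rgb256 [] 0]
  simp only [List.nil_append]
  cases hE : pvEnds rgb256 0 with
  | nil =>
    simp [pvCombine, pvMaxE]
  | cons x t =>
    have hnn : ∀ v ∈ x :: t, 0 ≤ v := hE ▸ pvEnds_nonneg rgb256 0 le_rfl
    have hx : 0 ≤ x := hnn x (by simp)
    have hm := PySem.List.max?_id_cons x t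
    have hMeq : pvMaxE (x :: t) = t.foldl max x := by
      unfold pvMaxE
      rw [List.foldl_cons]
      congr 1
      omega
    set M := t.foldl max x with hMdef
    by_cases h0 : M = 0
    · rw [if_pos (by rw [hm]; simp [h0])]
      unfold pvCombine
      rw [hMeq, if_neg (by omega)]
    · rw [if_neg (by rw [hm]; simp; omega)]
      simp only [hm, Option.getD_some]
      have hmem : M ∈ x :: t := by
        rw [← hMeq]
        exact pvMaxE_mem _ (by rw [hMeq]; omega)
      obtain ⟨j, hj⟩ : ∃ j, PySem.List.index? (x :: t) M = some j :=
        Option.isSome_iff_exists.mp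
          ((PySem.List.index?_isSome_iff (x :: t) M).2 hmem)
      have hMpos : 0 < M := by
        have hxle : x ≤ M := (PySem.List.le_foldl_max t x).1
        omega
      unfold pvCombine pvIdxE
      rw [hMeq, if_pos (by omega)]
      simp only [Prod.mk.injEq]
      exact ⟨by ring, by trivial⟩

-- ===== VERDICT (by name: the statement is the Claim_ definition above) =====
theorem find_largest_color_block_py_spec : Claim_equal_find_largest_color_block_py := by
  intro rgb256 _
  unfold Spec_find_largest_color_block_py find_largest_color_block_py
  rw [pvAltChar, pvMainInd rgb256.length rgb256 le_rfl 0 0 0 le_rfl (fun _ => rfl)]
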